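-- pv_equiv track=rewrite | github.com/jdeleon-py/Project_Euler | 0145_rev_nums/program.py | is_reversible
-- ===== SOURCE A (Python) =====
-- get_rev: int = lambda n: int("".join([i for i in str(n)][::-1]))
--
-- def is_reversible(n: int) -> bool:
--     rev_num: int = n + get_rev(n)
--     rev_arr: list = [int(i) for i in str(rev_num)]
--     all_odd: bool = True
--     for digit in rev_arr:
--         if digit % 2 == 0:
--             return False
--     return True
-- ===== SOURCE B (Python) =====
-- def is_reversible(n: int) -> bool:
--     s = n + int(str(n)[::-1])
--     if s == 0:
--         return False
--     while s > 0:
--         if s % 2 == 0:  # parity of s is the parity of its last digit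
--             return False
--         s //= 10
--     return True
-- ===== Notes on version B (the rewrite author's own statement) =====
-- stated objective: idiomatic
-- what changed: B drops A's per-character int() digit-list building and its list scan: after one string-slice reversal it tests the digit parities of the sum purely arithmetically, taking the remainder and quotient of the running integer instead of materialising any list.
import Mathlib
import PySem

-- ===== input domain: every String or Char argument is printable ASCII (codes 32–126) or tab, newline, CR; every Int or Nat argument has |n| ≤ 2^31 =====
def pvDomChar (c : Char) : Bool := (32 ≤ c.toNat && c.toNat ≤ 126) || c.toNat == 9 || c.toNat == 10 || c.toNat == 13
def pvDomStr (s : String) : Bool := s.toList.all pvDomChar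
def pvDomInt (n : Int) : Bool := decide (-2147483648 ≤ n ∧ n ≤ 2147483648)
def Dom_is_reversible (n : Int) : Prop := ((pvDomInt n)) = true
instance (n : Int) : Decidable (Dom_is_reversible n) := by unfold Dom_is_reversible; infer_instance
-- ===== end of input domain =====

-- B keeps the string-slice reversal but replaces A's per-character int() digit-list building and
-- scan with a pure arithmetic parity loop over the sum (idiomatic; no intermediate lists).

-- ===== PORT A =====
-- get_rev = lambda n: int("".join([i for i in str(n)][::-1]))
-- none = Python's int() raises ValueError (happens exactly for negative n, excluded by Pre_)
def pvGetRev (n : Int) : Option Int :=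
  PySem.Int.ofChars?
    (PySem.Chars.join []
      ((PySem.List.slice? ((PySem.Int.toStr n).toList.map (fun c => [c])) none none (-1)).getD []))

-- the for-loop over rev_arr: returns False on the first even digit, else True
def pvScanA : List Int → Bool
  | [] => true
  | d :: t => if PySem.Int.mod d 2 = 0 then false else pvScanA t

def is_reversible (n : Int) : Bool :=
  match pvGetRev n with
  | none => false        -- Python raises ValueError here (negative n); outside Pre_
  | some r =>
    let rev_num : Int := n + r
    -- rev_arr = [int(i) for i in str(rev_num)]; each i is a digit char here, int(i) never raises
    let rev_arr : List Int :=
      (PySem.Int.toStr rev_num).toList.map (fun c => (PySem.Int.ofChars? [c]).getD 0)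
    pvScanA rev_arr

-- ===== PORT B =====
-- while s > 0: if s % 2 == 0: return False ; s //= 10 ; return True
def pvAltLoop (s : Int) : Bool :=
  if _h : 0 < s then
    if PySem.Int.mod s 2 = 0 then false
    else pvAltLoop (PySem.Int.floordiv s 10)
  else true
  termination_by s.toNat
  decreasing_by
    have h10 : PySem.Int.floordiv s 10 = s / 10 := PySem.Int.floordiv_eq_ediv_of_pos (by norm_num)
    rw [h10]; omega

def is_reversible_alt (n : Int) : Bool :=
  -- str(n)[::-1]; step -1 never raises, so the slice is always `some`
  let revStr : String := (PySem.Str.slice? (PySem.Int.toStr n) none none (-1)).getD ""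
  match PySem.Int.ofStr? revStr with
  | none => false        -- Python raises ValueError here (negative n); outside Pre_
  | some r =>
    let s : Int := n + r
    if s = 0 then false else pvAltLoop s

-- ===== PRECONDITION & SPEC =====
-- Pre_ excludes exactly the negative inputs, where Python A raises ValueError (int() of the reversed string, which ends in the minus sign).
def Pre_is_reversible (n : Int) : Prop := 0 ≤ n
instance (n : Int) : Decidable (Pre_is_reversible n) := by unfold Pre_is_reversible; infer_instance

def pvWitness_is_reversible : Int := 36

def Spec_is_reversible (n : Int) (out : Bool) : Prop := out = is_reversible_alt n
instance (n : Int) (out : Bool) : Decidable (Spec_is_reversible n out) := by unfold Spec_is_reversible; infer_instance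

-- ===== CLAIM (what is proved, stated in full; the proofs are below) =====
def Claim_equal_is_reversible : Prop := ∀ (n : Int), Dom_is_reversible n → Pre_is_reversible n → Spec_is_reversible n (is_reversible n)

-- ===== LEMMAS AND PROOFS =====

-- Both reversal expressions are int() applied to the reversed digit string of n.
theorem pvGetRev_eq (n : Int) :
    pvGetRev n = PySem.Int.ofChars? (PySem.Int.toChars n).reverse := by
  unfold pvGetRev
  rw [PySem.List.slice?_none_none_neg_one]
  simp [← List.map_reverse, PySem.Chars.join_nil_singletons, PySem.Int.toList_toStr]

theorem pvAltRev_eq (n : Int) :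
    PySem.Int.ofStr? ((PySem.Str.slice? (PySem.Int.toStr n) none none (-1)).getD "") =
      PySem.Int.ofChars? (PySem.Int.toChars n).reverse := by
  rw [PySem.Str.slice?_none_none_neg_one]
  simp [PySem.Int.ofStr?_ofList, PySem.Int.toList_toStr]

theorem pv_not_space_of_digit {c : Char} (h : c.isDigit = true) :
    PySem.Int.isIntSpace c = false := by
  simp only [PySem.Int.isIntSpace, Bool.or_eq_false_iff, decide_eq_false_iff_not]
  refine ⟨⟨⟨⟨⟨?_, ?_⟩, ?_⟩, ?_⟩, ?_⟩, ?_⟩ <;> (rintro rfl; exact absurd h (by decide))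

-- int() of a nonempty all-digit string yields a nonnegative value.
theorem pv_ofChars_digits_nonneg {cs : List Char} {r : Int}
    (hd : ∀ c ∈ cs, c.isDigit = true)
    (hr : PySem.Int.ofChars? cs = some r) : 0 ≤ r := by
  have hdrop : ∀ (l : List Char), (∀ c ∈ l, c.isDigit = true) →
      List.dropWhile PySem.Int.isIntSpace l = l := by
    intro l hl
    rw [List.dropWhile_eq_self_iff]
    intro h0
    have := hl l[0] (List.getElem_mem h0)
    simp [pv_not_space_of_digit this]
  unfold PySem.Int.ofChars? at hr
  rw [hdrop cs hd] at hr
  rw [hdrop cs.reverse (by intro c hc; exact hd c (List.mem_reverse.mp hc))] at hr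
  rw [List.reverse_reverse] at hr
  dsimp only at hr
  split at hr
  · exact absurd (hd '-' List.mem_cons_self) (by decide)
  · exact absurd (hd '+' List.mem_cons_self) (by decide)
  · simp only [Option.pure_def, Option.bind_eq_bind, Option.map_eq_some_iff] at hr
    obtain ⟨v, hv, hrv⟩ := hr
    rw [Option.bind_eq_some_iff] at hv
    obtain ⟨a, _, ha⟩ := hv
    cases ha
    subst hrv
    exact Int.natCast_nonneg a

-- str(m) for m : Nat is the reversed little-endian digit list, rendered with digitChar.
theorem pv_toDigits_eq (m : Nat) (hm : 0 < m) :
    Nat.toDigits 10 m = ((Nat.digits 10 m).map Nat.digitChar).reverse := by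
  induction m using Nat.strong_induction_on with
  | _ m ih =>
    rw [Nat.toDigits_eq_if (by norm_num)]
    by_cases h10 : m < 10
    · rw [if_pos h10, Nat.digits_def' (by norm_num) hm]
      have : m / 10 = 0 := Nat.div_eq_of_lt h10
      rw [this, Nat.digits_zero]
      simp [Nat.mod_eq_of_lt h10]
    · rw [if_neg h10]
      have hdiv : 0 < m / 10 := Nat.div_pos (le_of_not_gt h10) (by norm_num)
      rw [ih (m / 10) (Nat.div_lt_self hm (by norm_num)) hdiv,
        Nat.digits_def' (by norm_num) hm]
      simp

-- int(i) of a single digit char recovers the digit.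
theorem pv_chval (d : Nat) (hd : d < 10) :
    (PySem.Int.ofChars? [Nat.digitChar d]).getD 0 = (d : Int) := by
  interval_cases d <;> decide

-- A's scan returns True iff every digit in the list is odd.
theorem pvScanA_eq_all (l : List Int) :
    pvScanA l = l.all (fun d => decide (¬ PySem.Int.mod d 2 = 0)) := by
  induction l with
  | nil => rfl
  | cons d t ih =>
    simp only [pvScanA, List.all_cons, ih]
    by_cases h : PySem.Int.mod d 2 = 0
    · rw [if_pos h]
      have : decide (¬ PySem.Int.mod d 2 = 0) = false := by simpa using h
      rw [this, Bool.false_and]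
    · rw [if_neg h]
      have : decide (¬ PySem.Int.mod d 2 = 0) = true := by simpa using h
      rw [this, Bool.true_and]

-- B's loop returns True iff every digit of m is odd.
theorem pvAltLoop_eq_all (m : Nat) (hm : 0 < m) :
    pvAltLoop (m : Int) = (Nat.digits 10 m).all (fun d => decide (d % 2 = 1)) := by
  induction m using Nat.strong_induction_on with
  | _ m ih =>
    rw [pvAltLoop]
    rw [dif_pos (by exact_mod_cast hm)]
    have hmod : PySem.Int.mod (m : Int) 2 = ((m % 2 : Nat) : Int) := PySem.Int.mod_natCast m 2
    have hdiv : PySem.Int.floordiv (m : Int) 10 = ((m / 10 : Nat) : Int) := PySem.Int.floordiv_natCast m 10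
    rw [Nat.digits_def' (b := 10) (by norm_num) hm]
    by_cases he : m % 2 = 0
    · have : PySem.Int.mod (m : Int) 2 = 0 := by rw [hmod, he]; rfl
      rw [if_pos this]
      have : m % 10 % 2 = 0 := by omega
      simp [this]
    · have h1 : m % 2 = 1 := Nat.mod_two_eq_zero_or_one m |>.resolve_left he
      have : ¬ PySem.Int.mod (m : Int) 2 = 0 := by
        rw [hmod, h1]; decide
      rw [if_neg this, hdiv]
      have hhead : m % 10 % 2 = 1 := by omega
      by_cases hq : m / 10 = 0
      · rw [hq]
        simp [hhead, pvAltLoop]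
      · rw [ih (m / 10) (Nat.div_lt_self hm (by norm_num)) (Nat.pos_of_ne_zero hq)]
        simp [hhead]

-- parity of a rendered digit char equals parity of the digit
theorem pv_all_digits (l : List Nat) (h : ∀ d ∈ l, d < 10) :
    ((l.map Nat.digitChar).map (fun c => (PySem.Int.ofChars? [c]).getD 0)).all
        (fun d => decide (¬ PySem.Int.mod d 2 = 0))
      = l.all (fun d => decide (d % 2 = 1)) := by
  induction l with
  | nil => rfl
  | cons d t ih =>
    simp only [List.map_cons, List.all_cons, ih (fun x hx => h x (List.mem_cons_of_mem _ hx))]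
    have hd10 : d < 10 := h d List.mem_cons_self
    have h2 : PySem.Int.mod ((d : Nat) : Int) 2 = ((d % 2 : Nat) : Int) := by
      exact_mod_cast PySem.Int.mod_natCast d 2
    simp only [pv_chval d hd10, h2]
    congr 1
    rw [decide_eq_decide]
    constructor <;> omega

-- The two parity tests agree on the digit list of the sum.
theorem pv_value_eq (s : Int) (hs : 0 ≤ s) :
    pvScanA ((PySem.Int.toStr s).toList.map (fun c => (PySem.Int.ofChars? [c]).getD 0)) =
      (if s = 0 then false else pvAltLoop s) := by
  rw [PySem.Int.toList_toStr]
  obtain ⟨m, rfl⟩ : ∃ m : Nat, s = (m : Int) := ⟨s.toNat, (Int.toNat_of_nonneg hs).symm⟩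
  by_cases hm0 : m = 0
  · subst hm0; decide
  · have hm : 0 < m := Nat.pos_of_ne_zero hm0
    rw [if_neg (by exact_mod_cast hm0)]
    have htc : PySem.Int.toChars (m : Int) = Nat.toDigits 10 m := by
      unfold PySem.Int.toChars
      rw [if_neg (by omega)]
      simp
    rw [htc, pv_toDigits_eq m hm, pvScanA_eq_all, pvAltLoop_eq_all m hm,
      List.map_reverse, List.all_reverse]
    exact pv_all_digits (Nat.digits 10 m) (fun d hd => Nat.digits_lt_base (by norm_num) hd)

-- n ≥ 0 ⇒ str(n) is all digit chars.
theorem pv_toChars_digits (n : Int) (hn : 0 ≤ n) :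
    ∀ c ∈ (PySem.Int.toChars n).reverse, c.isDigit = true := by
  intro c hc
  rw [List.mem_reverse] at hc
  unfold PySem.Int.toChars at hc
  rw [if_neg (by omega)] at hc
  exact Nat.isDigit_of_mem_toDigits (by norm_num) (by norm_num) hc

-- ===== VERDICT (by name: the statement is the Claim_ definition above) =====
theorem is_reversible_spec : Claim_equal_is_reversible := by
  intro n _ hpre
  have hn : (0 : Int) ≤ n := hpre
  unfold Spec_is_reversible
  unfold is_reversible is_reversible_alt
  dsimp only
  rw [pvGetRev_eq, pvAltRev_eq]
  cases hr : PySem.Int.ofChars? (PySem.Int.toChars n).reverse with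
  | none => rfl
  | some r =>
    dsimp only
    have hr0 : 0 ≤ r := pv_ofChars_digits_nonneg (pv_toChars_digits n hn) hr
    exact pv_value_eq (n + r) (by omega)
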